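-- pv_equiv track=rewrite | github.com/shazow/batterym | biapplet/history.py | separate_by_status
-- ===== SOURCE A (Python) =====
-- def separate_by_status(samples):
--     result = []
--     chunk = []
--     prev = None
--     for curr in samples:
--         if prev is not None:
--             if curr['status'] != prev['status']:
--                 result.append(chunk)
--                 chunk = []
--         chunk.append(curr)
--         prev = curr
--     result.append(chunk)
--     return result
-- ===== SOURCE B (Python) =====
-- def separate_by_status(samples):
--     # Two staged passes: first collect the cut indices where the status
--     # changes, then build the chunks by slicing between consecutive cuts.
--     n = len(samples)
--     cuts = [0]
--     for i in range(1, n):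
--         if samples[i]['status'] != samples[i - 1]['status']:
--             cuts.append(i)
--     cuts.append(n)
--     return [samples[cuts[j]:cuts[j + 1]] for j in range(len(cuts) - 1)]
-- ===== Notes on version B (the rewrite author's own statement) =====
-- stated objective: alternative
-- what changed: B replaces A's single pass with running chunk/prev state by two staged passes: it first computes the list of cut indices where the status changes, then builds the chunks by slicing between consecutive cuts.
import Mathlib
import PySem

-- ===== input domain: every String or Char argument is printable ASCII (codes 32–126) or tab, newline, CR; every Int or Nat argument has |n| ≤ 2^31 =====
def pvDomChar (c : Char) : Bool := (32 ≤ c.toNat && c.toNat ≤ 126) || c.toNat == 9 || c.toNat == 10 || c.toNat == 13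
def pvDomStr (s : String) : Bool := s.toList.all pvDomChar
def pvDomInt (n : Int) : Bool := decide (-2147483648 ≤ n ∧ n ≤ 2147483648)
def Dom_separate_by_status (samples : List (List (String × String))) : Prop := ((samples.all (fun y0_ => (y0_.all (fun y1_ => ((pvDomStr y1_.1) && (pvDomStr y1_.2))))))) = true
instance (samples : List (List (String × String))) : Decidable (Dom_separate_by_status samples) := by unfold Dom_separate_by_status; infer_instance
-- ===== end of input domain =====

-- B computes boundary indices first and then slices between consecutive cuts, instead of A's one pass with a running chunk/prev state (alternative decomposition, same cost).

-- ===== PORT A =====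
-- status lookup curr['status'] (KeyError when the key is absent -> none; such inputs are excluded by Pre_)
def pvStatus (d : List (String × String)) : Option String := (PySem.Dict.mk d).get? "status"

-- one iteration of A's loop over (result, chunk, prev)
def pvAStep (st : List (List (List (String × String))) × List (List (String × String)) × Option (List (String × String)))
    (curr : List (String × String)) :
    List (List (List (String × String))) × List (List (String × String)) × Option (List (String × String)) :=
  match st with
  | (result, chunk, prev) =>
    match prev with
    | some p =>
      if pvStatus curr ≠ pvStatus p then (result ++ [chunk], [curr], some curr)
      else (result, chunk ++ [curr], some curr)
    | none => (result, chunk ++ [curr], some curr)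

def separate_by_status (samples : List (List (String × String))) : List (List (List (String × String))) :=
  match samples.foldl pvAStep ([], [], none) with
  | (result, chunk, _) => result ++ [chunk]

-- ===== PORT B =====
-- transliteration of Source B: build cuts = [0] ++ boundary indices ++ [n], then slice between
-- consecutive cuts.  List indices samples[i], samples[i-1], cuts[j], cuts[j+1] are always in
-- range in the Python, so pyGetD with a dummy default is exact here.
def separate_by_status_alt (samples : List (List (String × String))) : List (List (List (String × String))) :=
  let n : Int := samples.length
  let cuts : List Int := (PySem.List.pyRange 1 n 1).foldl
    (fun cuts i =>
      if pvStatus (PySem.List.pyGetD samples i []) ≠ pvStatus (PySem.List.pyGetD samples (i-1) []) then cuts ++ [i]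
      else cuts) [0]
  let cuts2 := cuts ++ [n]
  (PySem.List.pyRange 0 ((cuts2.length : Int) - 1) 1).map
    (fun j => PySem.List.slice samples (some (PySem.List.pyGetD cuts2 j 0)) (some (PySem.List.pyGetD cuts2 (j+1) 0)))

-- ===== PRECONDITION & SPEC =====
-- Pre_ excludes exactly the inputs where A raises KeyError: two or more samples with some sample lacking a 'status' key.
def Pre_separate_by_status (samples : List (List (String × String))) : Prop :=
  samples.length ≤ 1 ∨ (samples.all (fun d => ((PySem.Dict.mk d).get? "status").isSome)) = true

instance (samples : List (List (String × String))) : Decidable (Pre_separate_by_status samples) := by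
  unfold Pre_separate_by_status; infer_instance

def pvWitness_separate_by_status : (List (List (String × String))) :=
  [[("status", "a")], [("status", "a")], [("status", "b")]]

def Spec_separate_by_status (samples : List (List (String × String))) (out : List (List (List (String × String)))) : Prop := out = separate_by_status_alt samples
instance (samples : List (List (String × String))) (out : List (List (List (String × String)))) : Decidable (Spec_separate_by_status samples out) := by unfold Spec_separate_by_status; infer_instance

-- ===== CLAIM (what is proved, stated in full; the proofs are below) =====
def Claim_equal_separate_by_status : Prop := ∀ (samples : List (List (String × String))), Dom_separate_by_status samples → Pre_separate_by_status samples → Spec_separate_by_status samples (separate_by_status samples)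

-- ===== LEMMAS AND PROOFS =====

-- common recursive characterization of the runs both ports compute
def pvRunsRec : List (List (String × String)) → List (List (List (String × String)))
  | [] => [[]]
  | [x] => [[x]]
  | x :: y :: t =>
    if pvStatus y ≠ pvStatus x then [x] :: pvRunsRec (y :: t)
    else match pvRunsRec (y :: t) with
      | [] => [[x]]
      | h :: r => (x :: h) :: r

-- ---- A side ----
def pvGlue (c : List (List (String × String))) (q : List (String × String))
    (res : List (List (List (String × String)))) : List (List (List (String × String))) :=
  match res with
  | [] => [c]
  | h :: t =>
    match h with
    | [] => c :: t
    | f :: _ => if pvStatus f = pvStatus q then (c ++ h) :: t else c :: h :: t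

def pvB0 (samples : List (List (String × String))) : List (List (List (String × String))) :=
  samples.foldr (fun x res => pvGlue [x] x res) [[]]

theorem pvGlue_head (x : List (String × String)) (res : List (List (List (String × String)))) :
    ∃ h t, pvGlue [x] x res = (x :: h) :: t := by
  match res with
  | [] => exact ⟨[], [], rfl⟩
  | [] :: t => exact ⟨[], t, rfl⟩
  | (f :: fs) :: t =>
    by_cases hs : pvStatus f = pvStatus x
    · exact ⟨f :: fs, t, by simp [pvGlue, hs]⟩
    · exact ⟨[], (f :: fs) :: t, by simp [pvGlue, hs]⟩

theorem pvGlue_glue_eq (c : List (List (String × String))) (q x : List (String × String))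
    (res : List (List (List (String × String)))) (hs : pvStatus x = pvStatus q) :
    pvGlue c q (pvGlue [x] x res) = pvGlue (c ++ [x]) x res := by
  match res with
  | [] => simp [pvGlue, hs]
  | [] :: t => simp [pvGlue, hs]
  | (f :: fs) :: t =>
    by_cases h1 : pvStatus f = pvStatus x
    · simp [pvGlue, ← hs, h1]
    · simp [pvGlue, ← hs, h1]

theorem pvGlue_glue_ne (c : List (List (String × String))) (q x : List (String × String))
    (res : List (List (List (String × String)))) (hs : ¬ pvStatus x = pvStatus q) :
    pvGlue c q (pvGlue [x] x res) = c :: pvGlue [x] x res := by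
  obtain ⟨h, t, e⟩ := pvGlue_head x res
  rw [e]
  simp [pvGlue, hs]

theorem pvA_loop (samples : List (List (String × String)))
    (r : List (List (List (String × String)))) (c : List (List (String × String)))
    (q : List (String × String)) :
    (match samples.foldl pvAStep (r, c, some q) with
     | (result, chunk, _) => result ++ [chunk]) = r ++ pvGlue c q (pvB0 samples) := by
  induction samples generalizing r c q with
  | nil => simp [pvB0, pvGlue]
  | cons x xs ih =>
    by_cases hs : pvStatus x = pvStatus q
    · have : pvAStep (r, c, some q) x = (r, c ++ [x], some x) := by
        simp [pvAStep, hs]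
      rw [List.foldl_cons, this, ih]
      have : pvB0 (x :: xs) = pvGlue [x] x (pvB0 xs) := by simp [pvB0]
      rw [this, pvGlue_glue_eq _ _ _ _ hs]
    · have : pvAStep (r, c, some q) x = (r ++ [c], [x], some x) := by
        simp [pvAStep, hs]
      rw [List.foldl_cons, this, ih]
      have h2 : pvB0 (x :: xs) = pvGlue [x] x (pvB0 xs) := by simp [pvB0]
      rw [h2, pvGlue_glue_ne _ _ _ _ hs, List.append_assoc]
      rfl

theorem pvA_eq_B0 (samples : List (List (String × String))) :
    separate_by_status samples = pvB0 samples := by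
  match samples with
  | [] => rfl
  | x :: xs =>
    have h1 : pvAStep ([], [], none) x = ([], [x], some x) := by simp [pvAStep]
    have := pvA_loop xs [] [x] x
    simp only [separate_by_status, List.foldl_cons, h1, this, List.nil_append]
    simp [pvB0]

theorem pvB0_eq_runs (samples : List (List (String × String))) :
    pvB0 samples = pvRunsRec samples := by
  match samples with
  | [] => rfl
  | [x] => rfl
  | x :: y :: t =>
    have hy : pvB0 (x :: y :: t) = pvGlue [x] x (pvB0 (y :: t)) := by simp [pvB0]
    obtain ⟨h, r, e⟩ := pvGlue_head y (pvB0 t)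
    have e' : pvB0 (y :: t) = (y :: h) :: r := by simpa [pvB0] using e
    have ih := pvB0_eq_runs (y :: t)
    by_cases hs : pvStatus y = pvStatus x
    · rw [hy, e', pvRunsRec]
      simp only [hs, ne_eq, not_true_eq_false, if_false]
      rw [← ih, e']
      simp [pvGlue, hs]
    · rw [hy, e', pvRunsRec]
      simp only [ne_eq, hs, not_false_eq_true, if_true]
      rw [← ih, e']
      simp [pvGlue, hs]

-- ---- B side ----
def pvPairsMap {α β : Type} (f : α → α → β) : List α → List β
  | a :: b :: r => f a b :: pvPairsMap f (b :: r)
  | _ => []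

def pvNatCut (s : List (List (String × String))) (i : Nat) : Bool :=
  decide (pvStatus (s.getD i []) ≠ pvStatus (s.getD (i - 1) []))

def pvInnerN (s : List (List (String × String))) : List Nat :=
  (List.range' 1 (s.length - 1)).filter (pvNatCut s)

def pvChunkF (s : List (List (String × String))) (a b : Nat) : List (List (String × String)) :=
  (s.drop a).take (b - a)

theorem pvPairsMap_map {α β γ : Type} (f : β → β → γ) (g : α → β) (l : List α) :
    pvPairsMap f (l.map g) = pvPairsMap (fun a b => f (g a) (g b)) l := by
  match l with
  | [] => rfl
  | [a] => rfl
  | a :: b :: r =>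
    have h := pvPairsMap_map f g (b :: r)
    simp only [List.map_cons] at h ⊢
    simp only [pvPairsMap]
    rw [← List.map_cons] at h
    simp only [List.map_cons] at h
    rw [h]

theorem pvPairsMap_congr {α β : Type} (f g : α → α → β) (l : List α)
    (h : ∀ a b, f a b = g a b) : pvPairsMap f l = pvPairsMap g l := by
  match l with
  | [] => rfl
  | [a] => rfl
  | a :: b :: r =>
    simp only [pvPairsMap, h]
    rw [pvPairsMap_congr f g (b :: r) h]

theorem pvMapRange_pairs {α β : Type} (l : List α) (d : α) (f : α → α → β) :
    (List.range (l.length - 1)).map (fun j => f (l.getD j d) (l.getD (j + 1) d)) = pvPairsMap f l := by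
  match l with
  | [] => rfl
  | [a] => rfl
  | a :: b :: r =>
    have hlen : (a :: b :: r).length - 1 = (b :: r).length - 1 + 1 := by simp
    rw [hlen, List.range_succ_eq_map]
    simp only [List.map_cons, List.map_map]
    have : ((List.range ((b :: r).length - 1)).map
        ((fun j => f ((a :: b :: r).getD j d) ((a :: b :: r).getD (j + 1) d)) ∘ Nat.succ))
        = (List.range ((b :: r).length - 1)).map (fun j => f ((b :: r).getD j d) ((b :: r).getD (j + 1) d)) := by
      apply List.map_congr_left
      intro k _
      simp [Function.comp]
    rw [this, pvMapRange_pairs (b :: r) d f]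
    simp [pvPairsMap, List.getD]

-- shift: chunks of (x :: xs) at cuts all ≥ 1 are chunks of xs at the cuts minus one
theorem pvPairs_shift (x : List (String × String)) (xs : List (List (String × String)))
    (cs : List Nat) :
    pvPairsMap (pvChunkF (x :: xs)) (cs.map (· + 1)) = pvPairsMap (pvChunkF xs) cs := by
  rw [pvPairsMap_map]
  apply pvPairsMap_congr
  intro a b
  simp [pvChunkF]

theorem pvInnerN_cons (x y : List (String × String)) (t : List (List (String × String))) :
    pvInnerN (x :: y :: t)
      = (if pvStatus y ≠ pvStatus x then [1] else []) ++ (pvInnerN (y :: t)).map (· + 1) := by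
  have hlen : (x :: y :: t).length - 1 = (y :: t).length - 1 + 1 := by simp
  have hr2 : List.range' 2 ((y :: t).length - 1) = (List.range' 1 ((y :: t).length - 1)).map (· + 1) := by
    simp only [List.range'_eq_map_range, List.map_map]
    apply List.map_congr_left
    intro k _
    simp [Function.comp]
    omega
  unfold pvInnerN
  rw [hlen, List.range'_succ, hr2, List.filter_cons, List.filter_map]
  have h2 : List.filter ((pvNatCut (x :: y :: t)) ∘ (· + 1)) (List.range' 1 ((y :: t).length - 1))
      = List.filter (pvNatCut (y :: t)) (List.range' 1 ((y :: t).length - 1)) := by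
    apply List.filter_congr
    intro k hk
    have h1k : 1 ≤ k := (List.mem_range'_1.mp hk).1
    rcases k with _ | k
    · omega
    · simp [pvNatCut, Function.comp]
  rw [h2]
  have h1 : pvNatCut (x :: y :: t) 1 = decide (pvStatus y ≠ pvStatus x) := by
    simp [pvNatCut, List.getD]
  rw [h1]
  by_cases hs : pvStatus y = pvStatus x
  · simp [hs]
  · simp [hs]

-- the central lemma: slicing at the cut points yields the recursive runs
theorem pvChunks_runs (s : List (List (String × String))) :
    pvPairsMap (pvChunkF s) (0 :: (pvInnerN s ++ [s.length])) = pvRunsRec s := by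
  match s with
  | [] => rfl
  | [x] => rfl
  | x :: y :: t =>
    rw [pvInnerN_cons]
    by_cases hs : pvStatus y = pvStatus x
    · simp only [hs, ne_eq, not_true_eq_false, if_false]
      obtain ⟨c, cs, hc⟩ := List.exists_cons_of_ne_nil
        (show pvInnerN (y :: t) ++ [(y :: t).length] ≠ [] by simp)
      have ih := pvChunks_runs (y :: t)
      rw [hc] at ih
      have hval : pvPairsMap (pvChunkF (y :: t)) (0 :: c :: cs)
          = pvChunkF (y :: t) 0 c :: pvPairsMap (pvChunkF (y :: t)) (c :: cs) := rfl
      rw [hval] at ih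
      have hlist : (0 : Nat) :: (([] ++ (pvInnerN (y :: t)).map (· + 1)) ++ [(x :: y :: t).length])
          = 0 :: ((pvInnerN (y :: t) ++ [(y :: t).length]).map (· + 1)) := by simp
      rw [hlist, hc]
      show pvChunkF (x :: y :: t) 0 (c + 1) :: pvPairsMap (pvChunkF (x :: y :: t))
          ((c + 1) :: cs.map (· + 1)) = pvRunsRec (x :: y :: t)
      have hmap : (c + 1) :: cs.map (· + 1) = (c :: cs).map (· + 1) := by simp
      rw [hmap, pvPairs_shift]
      have hfirst : pvChunkF (x :: y :: t) 0 (c + 1) = x :: pvChunkF (y :: t) 0 c := by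
        simp [pvChunkF]
      rw [hfirst]
      show (x :: pvChunkF (y :: t) 0 c) :: pvPairsMap (pvChunkF (y :: t)) (c :: cs)
          = pvRunsRec (x :: y :: t)
      simp only [pvRunsRec, hs, ne_eq, not_true_eq_false, if_false]
      rw [← ih]
    · simp only [ne_eq, hs, not_false_eq_true, if_true]
      have hlist : (0 : Nat) :: (([1] ++ (pvInnerN (y :: t)).map (· + 1)) ++ [(x :: y :: t).length])
          = 0 :: 1 :: ((pvInnerN (y :: t) ++ [(y :: t).length]).map (· + 1)) := by
        simp
      rw [hlist]
      show pvChunkF (x :: y :: t) 0 1 :: pvPairsMap (pvChunkF (x :: y :: t))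
          (1 :: ((pvInnerN (y :: t) ++ [(y :: t).length]).map (· + 1))) = pvRunsRec (x :: y :: t)
      have hmap : (1 : Nat) :: ((pvInnerN (y :: t) ++ [(y :: t).length]).map (· + 1))
          = ((0 :: (pvInnerN (y :: t) ++ [(y :: t).length])).map (· + 1)) := by simp
      rw [hmap, pvPairs_shift, pvChunks_runs (y :: t)]
      simp [pvRunsRec, hs, pvChunkF]

-- ---- normalizing port B to the Nat-level cut list ----
theorem pvCutsB (s : List (List (String × String))) :
    ((PySem.List.pyRange 1 (s.length : Int) 1).foldl
        (fun cuts i =>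
          if pvStatus (PySem.List.pyGetD s i []) ≠ pvStatus (PySem.List.pyGetD s (i - 1) []) then cuts ++ [i]
          else cuts) [0]) ++ [(s.length : Int)]
      = (0 :: (pvInnerN s ++ [s.length])).map (fun k : Nat => (k : Int)) := by
  rw [PySem.List.foldl_append_ite_eq_filter
      (fun i => pvStatus (PySem.List.pyGetD s i []) ≠ pvStatus (PySem.List.pyGetD s (i - 1) []))]
  have hrange : PySem.List.pyRange 1 (s.length : Int) 1
      = (List.range' 1 (s.length - 1)).map (fun k : Nat => (k : Int)) := by
    rw [PySem.List.pyRange_one, List.range'_eq_map_range, List.map_map]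
    have hn : ((s.length : Int) - 1).toNat = s.length - 1 := by omega
    rw [hn]
    apply List.map_congr_left
    intro k _
    simp [Function.comp]
  rw [hrange, List.filter_map]
  have hfc : List.filter
      ((fun i => decide (pvStatus (PySem.List.pyGetD s i []) ≠ pvStatus (PySem.List.pyGetD s (i - 1) []))) ∘ (fun k : Nat => (k : Int)))
      (List.range' 1 (s.length - 1))
      = List.filter (pvNatCut s) (List.range' 1 (s.length - 1)) := by
    apply List.filter_congr
    intro k hk
    have h1k : 1 ≤ k := (List.mem_range'_1.mp hk).1
    have hsub : (k : Int) - 1 = ((k - 1 : Nat) : Int) := by omega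
    simp only [Function.comp, hsub, PySem.List.pyGetD_natCast, pvNatCut]
  rw [hfc]
  simp [pvInnerN]

theorem pvB_eq_runs (s : List (List (String × String))) :
    separate_by_status_alt s = pvRunsRec s := by
  have halt : separate_by_status_alt s
      = (PySem.List.pyRange 0
            ((((0 :: (pvInnerN s ++ [s.length])).map (fun k : Nat => (k : Int))).length : Int) - 1) 1).map
          (fun j => PySem.List.slice s
            (some (PySem.List.pyGetD ((0 :: (pvInnerN s ++ [s.length])).map (fun k : Nat => (k : Int))) j 0))
            (some (PySem.List.pyGetD ((0 :: (pvInnerN s ++ [s.length])).map (fun k : Nat => (k : Int))) (j + 1) 0))) := by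
    unfold separate_by_status_alt
    rw [← pvCutsB]
  rw [halt]
  set cn : List Nat := 0 :: (pvInnerN s ++ [s.length]) with hcn
  have hlen : (((cn.map (fun k : Nat => (k : Int))).length : Int) - 1) = ((cn.length - 1 : Nat) : Int) := by
    simp [hcn]
  rw [hlen]
  rw [PySem.List.pyRange_one]
  have hn2 : (((cn.length - 1 : Nat) : Int) - 0).toNat = cn.length - 1 := by omega
  rw [hn2, List.map_map]
  have hmap : (List.range (cn.length - 1)).map
      ((fun j => PySem.List.slice s
            (some (PySem.List.pyGetD (cn.map (fun k : Nat => (k : Int))) j 0))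
            (some (PySem.List.pyGetD (cn.map (fun k : Nat => (k : Int))) (j + 1) 0))) ∘ (fun k : Nat => (0 : Int) + k))
      = (List.range (cn.length - 1)).map (fun j => pvChunkF s (cn.getD j 0) (cn.getD (j + 1) 0)) := by
    apply List.map_congr_left
    intro k _
    have hz : ((0 : Int) + (k : Int)) = ((k : Nat) : Int) := by omega
    have hz2 : (k : Int) + 1 = (((k + 1 : Nat)) : Int) := by push_cast; ring
    simp only [Function.comp, hz, hz2, PySem.List.pyGetD_natCast]
    have hg1 : (cn.map (fun k : Nat => (k : Int))).getD k 0 = ((cn.getD k 0 : Nat) : Int) :=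
      List.getD_map cn 0 (fun k : Nat => (k : Int))
    have hg2 : (cn.map (fun k : Nat => (k : Int))).getD (k + 1) 0 = ((cn.getD (k + 1) 0 : Nat) : Int) :=
      List.getD_map cn 0 (fun k : Nat => (k : Int))
    rw [hg1, hg2, PySem.List.slice_natCast]
    rfl
  rw [hmap, pvMapRange_pairs cn 0 (pvChunkF s), hcn, pvChunks_runs]

-- ===== VERDICT (by name: the statement is the Claim_ definition above) =====
theorem separate_by_status_spec : Claim_equal_separate_by_status := by
  intro samples _ _
  unfold Spec_separate_by_status
  rw [pvA_eq_B0, pvB0_eq_runs, ← pvB_eq_runs]
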